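-- pv_equiv track=rewrite | github.com/Nayukiiii/astrbot_plugin_caoqunyou | graph_render.py | _filter_edges
-- ===== SOURCE A (Python) =====
-- def _filter_edges(
--     edge_count: dict[tuple[str,str],int],
--     n_nodes: int,
-- ) -> dict[tuple[str,str],int]:
--     """
--     根据节点数裁剪要渲染的边，避免密集时变成毛线球。
--     始终优先保留：互草边 > 高频单向边。
--     """
--     mutual = {(a,b) for (a,b) in edge_count if (b,a) in edge_count}
--
--     if n_nodes <= 15:
--         # 全部保留
--         return dict(edge_count)
--
--     if n_nodes <= 40:
--         min_cnt = 2   # 单向边至少2次才画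
--         max_edges = 300
--     else:
--         min_cnt = 3   # 单向边至少3次才画
--         max_edges = 200
--
--     # 互草边全保留，单向边按阈值过滤
--     kept = {}
--     for (a,b),cnt in edge_count.items():
--         is_mutual = (a,b) in mutual
--         if is_mutual or cnt >= min_cnt:
--             kept[(a,b)] = cnt
--
--     # 若还是超过 max_edges，按频次降序截断
--     if len(kept) > max_edges:
--         kept = dict(sorted(kept.items(), key=lambda x: (
--             1 if (x[0][0],x[0][1]) in mutual else 0,  # 互草优先
--             x[1]  # 频次其次
--         ), reverse=True)[:max_edges])
--
--     return kept
-- ===== SOURCE B (Python) =====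
-- def _filter_edges(
--     edge_count: dict[tuple[str,str],int],
--     n_nodes: int,
-- ) -> dict[tuple[str,str],int]:
--     # Same kept-edge selection, but the truncation never sorts the edges:
--     # kept edges are hashed into buckets keyed by (priority, count); only the
--     # few distinct bucket keys are sorted (descending), and the quota is
--     # filled greedily bucket by bucket, stopping as soon as max_edges is
--     # reached.  Stability of Python's sort makes this equal to A's single
--     # stable composite-key sort followed by a slice.
--     if n_nodes <= 15:
--         return dict(edge_count)
--
--     min_cnt, max_edges = (2, 300) if n_nodes <= 40 else (3, 200)
--
--     kept = [(e, c) for e, c in edge_count.items()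
--             if (e[1], e[0]) in edge_count or c >= min_cnt]
--
--     if len(kept) <= max_edges:
--         return dict(kept)
--
--     buckets = {}
--     for item in kept:
--         key = (1 if (item[0][1], item[0][0]) in edge_count else 0, item[1])
--         buckets.setdefault(key, []).append(item)
--
--     out = []
--     for key in sorted(buckets, reverse=True):
--         room = max_edges - len(out)
--         if room <= 0:
--             break
--         out.extend(buckets[key][:room])
--     return dict(out)
-- ===== Notes on version B (the rewrite author's own statement) =====
-- stated objective: alternative
-- what changed: B never sorts the edges to truncate: kept edges are grouped once into hash buckets keyed by (priority, count), only the distinct bucket keys are sorted descending, and the max_edges quota is filled greedily bucket by bucket with an early break, replacing A's full stable composite-key sort plus slice.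
import Mathlib
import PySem

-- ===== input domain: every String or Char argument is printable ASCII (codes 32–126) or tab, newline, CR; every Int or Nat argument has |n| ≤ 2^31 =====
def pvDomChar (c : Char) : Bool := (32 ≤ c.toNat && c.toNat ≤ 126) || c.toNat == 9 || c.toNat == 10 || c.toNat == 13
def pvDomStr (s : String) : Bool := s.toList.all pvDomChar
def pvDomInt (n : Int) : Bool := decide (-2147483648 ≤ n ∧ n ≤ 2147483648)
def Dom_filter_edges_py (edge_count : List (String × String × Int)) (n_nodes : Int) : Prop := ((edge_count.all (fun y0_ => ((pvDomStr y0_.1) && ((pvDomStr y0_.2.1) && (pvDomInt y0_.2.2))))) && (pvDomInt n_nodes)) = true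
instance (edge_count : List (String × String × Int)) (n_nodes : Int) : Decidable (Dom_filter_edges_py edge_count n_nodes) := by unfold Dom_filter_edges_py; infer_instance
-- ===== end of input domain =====

-- B never sorts the edges to truncate: kept edges are hashed into buckets keyed by
-- (priority, count), only the distinct bucket keys are sorted descending, and the
-- max_edges quota is filled greedily bucket by bucket with an early break
-- (objective: alternative algorithm, not claimed faster).
-- The dict argument/result is the association list of its items (a, b, cnt).

-- ===== PORT A =====
def filter_edges_py (edge_count : List (String × String × Int)) (n_nodes : Int) : List (String × String × Int) :=
  let keys := edge_count.map (fun e => (e.1, e.2.1))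
  -- mutual = {(a,b) for (a,b) in edge_count if (b,a) in edge_count}
  let mutualS : PySem.Set (String × String) :=
    PySem.Set.ofList (keys.filter (fun k => keys.contains (k.2, k.1)))
  if n_nodes ≤ 15 then
    -- return dict(edge_count)
    (PySem.Dict.ofList (edge_count.map (fun e => ((e.1, e.2.1), e.2.2)))).items.map
      (fun p => (p.1.1, p.1.2, p.2))
  else
    -- (min_cnt, max_edges) set in the two branches
    let mc : Int × Int := if n_nodes ≤ 40 then (2, 300) else (3, 200)
    -- kept = {}; for (a,b),cnt: if is_mutual or cnt >= min_cnt: kept[(a,b)] = cnt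
    let kept : PySem.Dict (String × String) Int :=
      edge_count.foldl (fun d e =>
        if mutualS.contains (e.1, e.2.1) ∨ mc.1 ≤ e.2.2 then d.insert (e.1, e.2.1) e.2.2 else d)
        PySem.Dict.empty
    -- if len(kept) > max_edges: kept = dict(sorted(kept.items(), key=..., reverse=True)[:max_edges])
    let kept2 : PySem.Dict (String × String) Int :=
      if mc.2 < (kept.size : Int) then
        PySem.Dict.ofList (PySem.List.slice
          (PySem.List.sorted2 kept.items
            (fun p => if mutualS.contains p.1 then (1 : Int) else 0)
            (fun p => p.2) true)
          none (some mc.2))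
      else kept
    kept2.items.map (fun p => (p.1.1, p.1.2, p.2))

-- ===== PORT B =====
-- the greedy quota loop of Source B: for key in ks: room = max_edges - len(out);
-- if room <= 0: break; out.extend(buckets[key][:room])
def pvFill (groups : PySem.Dict (Int × Int) (List (String × String × Int))) (maxE : Int) :
    List (Int × Int) → List (String × String × Int) → List (String × String × Int)
  | [], out => out
  | k :: ks, out =>
      if maxE - (out.length : Int) ≤ 0 then out
      else pvFill groups maxE ks
        (out ++ PySem.List.slice (groups.getD k []) none (some (maxE - (out.length : Int))))

-- Transliteration of Source B: the same kept filter, then (only over the cap) a single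
-- grouping pass into buckets keyed by (priority, count), a sort of the distinct
-- bucket keys only, and the greedy fill pvFill.  dict(...) at the end is the
-- association list itself (its keys are distinct under Pre_).
def filter_edges_py_alt (edge_count : List (String × String × Int)) (n_nodes : Int) : List (String × String × Int) :=
  if n_nodes ≤ 15 then edge_count
  else
    let mc : Int × Int := if n_nodes ≤ 40 then (2, 300) else (3, 200)
    let keys := edge_count.map (fun f => (f.1, f.2.1))
    let kept := edge_count.filter (fun e => keys.contains (e.2.1, e.1) || decide (mc.1 ≤ e.2.2))
    if (kept.length : Int) ≤ mc.2 then kept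
    else
      let keyOf : String × String × Int → Int × Int :=
        fun e => ((if keys.contains (e.2.1, e.1) then 1 else 0), e.2.2)
      -- buckets.setdefault(key, []).append(item)  ==  modify key [] (· ++ [item])
      let groups : PySem.Dict (Int × Int) (List (String × String × Int)) :=
        kept.foldl (fun d e => d.modify (keyOf e) [] (fun b => b ++ [e])) PySem.Dict.empty
      -- for key in sorted(buckets, reverse=True): … (tuple keys, lex descending)
      pvFill groups mc.2 (PySem.List.sorted2 groups.keys Prod.fst Prod.snd true) []

-- ===== PRECONDITION & SPEC =====
-- Pre_ excludes lists whose (a, b) key pairs are not pairwise distinct: such a list is not the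
-- item list of any Python dict (dict keys are unique), so no Python-level input is excluded.
def Pre_filter_edges_py (edge_count : List (String × String × Int)) (n_nodes : Int) : Prop :=
  (edge_count.map (fun f => (f.1, f.2.1))).Nodup
instance (edge_count : List (String × String × Int)) (n_nodes : Int) : Decidable (Pre_filter_edges_py edge_count n_nodes) := by unfold Pre_filter_edges_py; infer_instance

def pvWitness_filter_edges_py : (List (String × String × Int)) × Int :=
  ([("a", "b", 1), ("b", "a", 2), ("a", "c", 3)], 20)

def Spec_filter_edges_py (edge_count : List (String × String × Int)) (n_nodes : Int) (out : List (String × String × Int)) : Prop := out = filter_edges_py_alt edge_count n_nodes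
instance (edge_count : List (String × String × Int)) (n_nodes : Int) (out : List (String × String × Int)) : Decidable (Spec_filter_edges_py edge_count n_nodes out) := by unfold Spec_filter_edges_py; infer_instance

-- ===== CLAIM (what is proved, stated in full; the proofs are below) =====
def Claim_equal_filter_edges_py : Prop := ∀ (edge_count : List (String × String × Int)) (n_nodes : Int), Dom_filter_edges_py edge_count n_nodes → Pre_filter_edges_py edge_count n_nodes → Spec_filter_edges_py edge_count n_nodes (filter_edges_py edge_count n_nodes)

-- ===== LEMMAS AND PROOFS =====

theorem pv_insertBy_cons {α : Type} (b : α → α → Bool) (x y : α) (ys : List α) :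
    PySem.List.insertBy b x (y :: ys)
      = if b x y then x :: y :: ys else y :: PySem.List.insertBy b x ys := by
  simp [PySem.List.insertBy]

theorem pv_insertBy_append_false {α : Type} (b : α → α → Bool) (x : α) (A B : List α)
    (hA : ∀ y ∈ A, b x y = false) :
    PySem.List.insertBy b x (A ++ B) = A ++ PySem.List.insertBy b x B := by
  induction A with
  | nil => rfl
  | cons a A ih =>
    simp only [List.cons_append, pv_insertBy_cons, hA a (by simp)]
    simp [ih (fun y hy => hA y (by simp [hy]))]

-- the strict 'goes before' test of Python's reverse sort with the tuple key (k1 x, k2 x)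
def pvB2 {α : Type} (k1 k2 : α → Int) : α → α → Bool :=
  fun a b => decide (k1 b < k1 a) || (!decide (k1 a < k1 b) && decide (k2 b < k2 a))

theorem pv_sorted2_rev_eq_foldl {α : Type} (l : List α) (k1 k2 : α → Int) :
    PySem.List.sorted2 l k1 k2 true
      = l.foldl (fun acc x => PySem.List.insertBy (pvB2 k1 k2) x acc) [] := by
  simp only [PySem.List.sorted2]
  rfl

theorem pv_sorted2_snoc {α : Type} (l : List α) (x : α) (k1 k2 : α → Int) :
    PySem.List.sorted2 (l ++ [x]) k1 k2 true
      = PySem.List.insertBy (pvB2 k1 k2) x (PySem.List.sorted2 l k1 k2 true) := by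
  rw [pv_sorted2_rev_eq_foldl, pv_sorted2_rev_eq_foldl, List.foldl_append]
  rfl

theorem pv_mem_sorted2 {α : Type} (l : List α) (k1 k2 : α → Int) (y : α)
    (h : y ∈ PySem.List.sorted2 l k1 k2 true) : y ∈ l :=
  (PySem.List.sorted2_perm l k1 k2 true).mem_iff.mp h

-- stable reverse sort peels off the class of the (lex-)maximal key, in input order
theorem pv_insertBy_all_true {α : Type} (b : α → α → Bool) (x : α) (l : List α)
    (h : ∀ y ∈ l, b x y = true) : PySem.List.insertBy b x l = x :: l := by
  cases l with
  | nil => rfl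
  | cons y ys => rw [pv_insertBy_cons, if_pos (h y (by simp))]

theorem pv_sorted2_maxclass {α : Type} (l : List α) (k1 k2 : α → Int) (m : Int × Int)
    (hmax : ∀ x ∈ l, k1 x < m.1 ∨ (k1 x = m.1 ∧ k2 x ≤ m.2)) :
    PySem.List.sorted2 l k1 k2 true
      = l.filter (fun x => decide ((k1 x, k2 x) = m))
        ++ PySem.List.sorted2 (l.filter (fun x => !decide ((k1 x, k2 x) = m))) k1 k2 true := by
  induction l using List.reverseRecOn with
  | nil => rfl
  | append_singleton l x ih =>
    have hmax' : ∀ y ∈ l, k1 y < m.1 ∨ (k1 y = m.1 ∧ k2 y ≤ m.2) :=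
      fun y hy => hmax y (by simp [hy])
    have hx := hmax x (by simp)
    rw [pv_sorted2_snoc, ih hmax']
    simp only [List.filter_append, List.filter_singleton]
    by_cases hk : (k1 x, k2 x) = m
    · have hk1 : k1 x = m.1 := by rw [← hk]
      have hk2 : k2 x = m.2 := by rw [← hk]
      simp only [hk, decide_true, Bool.not_true, cond_true, cond_false, List.append_nil]
      rw [pv_insertBy_append_false _ _ _ _ (by
        intro y hy
        have hy2 : (k1 y, k2 y) = m := of_decide_eq_true (List.mem_filter.mp hy).2
        have a1 : k1 y = m.1 := by rw [← hy2]
        have a2 : k2 y = m.2 := by rw [← hy2]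
        simp [pvB2, hk1, hk2, a1, a2])]
      rw [pv_insertBy_all_true _ _ _ (by
        intro y hy
        have hyl := pv_mem_sorted2 _ _ _ _ hy
        have hyne : ¬ ((k1 y, k2 y) = m) := by
          simpa using (List.mem_filter.mp hyl).2
        have hym := hmax' y (List.mem_of_mem_filter hyl)
        have hyne' : ¬ (k1 y = m.1 ∧ k2 y = m.2) := by
          simpa [Prod.ext_iff] using hyne
        simp only [pvB2, hk1, hk2]
        simp only [Bool.or_eq_true, Bool.and_eq_true, Bool.not_eq_eq_eq_not, Bool.not_true,
          decide_eq_true_eq, decide_eq_false_iff_not]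
        omega)]
      simp
    · have hk' : ¬ (k1 x = m.1 ∧ k2 x = m.2) := by simpa [Prod.ext_iff] using hk
      have hkd : decide ((k1 x, k2 x) = m) = false := by simp [hk]
      simp only [hkd, Bool.not_false, cond_true, cond_false, List.append_nil]
      rw [pv_sorted2_snoc]
      rw [pv_insertBy_append_false _ _ _ _ (by
        intro y hy
        have hy2 : (k1 y, k2 y) = m := of_decide_eq_true (List.mem_filter.mp hy).2
        have a1 : k1 y = m.1 := by rw [← hy2]
        have a2 : k2 y = m.2 := by rw [← hy2]
        simp only [pvB2, a1, a2]
        simp only [Bool.or_eq_false_iff, Bool.and_eq_false_iff, decide_eq_false_iff_not,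
          Bool.not_eq_eq_eq_not, Bool.not_false, decide_eq_true_eq]
        omega)]

-- sorted2 equals the concatenation of its key classes when the key list is
-- strictly lex-descending and covers every element
theorem pv_sorted2_flatMap {α : Type} (k1 k2 : α → Int) :
    ∀ (ks : List (Int × Int)) (l : List α),
      ks.Pairwise (fun a b => b.1 < a.1 ∨ (b.1 = a.1 ∧ b.2 < a.2)) →
      (∀ x ∈ l, (k1 x, k2 x) ∈ ks) →
      PySem.List.sorted2 l k1 k2 true
        = ks.flatMap (fun k => l.filter (fun x => decide ((k1 x, k2 x) = k))) := by
  intro ks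
  induction ks with
  | nil =>
    intro l _ hcov
    have hl : l = [] := by
      cases l with
      | nil => rfl
      | cons a l => exact absurd (hcov a (by simp)) (by simp)
    rw [hl]
    rfl
  | cons k ks ih =>
    intro l hpw hcov
    have hhead := (List.pairwise_cons.mp hpw).1
    have htail := (List.pairwise_cons.mp hpw).2
    have hmax : ∀ x ∈ l, k1 x < k.1 ∨ (k1 x = k.1 ∧ k2 x ≤ k.2) := by
      intro x hx
      rcases List.mem_cons.mp (hcov x hx) with h | h
      · right; exact ⟨by rw [← h], le_of_eq (by rw [← h])⟩
      · rcases hhead _ h with h1 | ⟨h1, h2⟩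
        · left; exact h1
        · right; exact ⟨h1, le_of_lt h2⟩
    rw [pv_sorted2_maxclass l k1 k2 k hmax]
    rw [ih (l.filter (fun x => !decide ((k1 x, k2 x) = k))) htail (by
      intro x hx
      have hm := List.mem_filter.mp hx
      rcases List.mem_cons.mp (hcov x hm.1) with h | h
      · exact absurd h (by simpa using hm.2)
      · exact h)]
    rw [List.flatMap_cons]
    congr 1
    refine List.flatMap_congr ?_
    intro k' hk'
    have hkk' : k' ≠ k := by
      intro he
      rcases hhead k' hk' with h | ⟨h1, h2⟩
      · exact absurd (he ▸ h) (lt_irrefl _)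
      · exact absurd (he ▸ h2) (lt_irrefl _)
    rw [List.filter_filter]
    refine List.filter_congr ?_
    intro x _
    by_cases hx : (k1 x, k2 x) = k'
    · simp [hx, hkk']
    · simp [hx]

-- insertion under an asymmetric, 'transitive against the complement' strict order keeps sortedness
theorem pv_insertBy_pairwise {α : Type} (b : α → α → Bool)
    (hasym : ∀ u v, b u v = true → b v u = false)
    (htrans : ∀ u v w, b u v = true → b w v = false → b w u = false)
    (x : α) (l : List α) (h : l.Pairwise (fun u v => b v u = false)) :
    (PySem.List.insertBy b x l).Pairwise (fun u v => b v u = false) := by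
  induction l with
  | nil => simp [PySem.List.insertBy]
  | cons y ys ih =>
    have hy := (List.pairwise_cons.mp h).1
    have hys := (List.pairwise_cons.mp h).2
    rw [pv_insertBy_cons]
    by_cases hb : b x y = true
    · rw [if_pos hb]
      refine List.pairwise_cons.mpr ⟨?_, h⟩
      intro v hv
      rcases List.mem_cons.mp hv with rfl | hv
      · exact hasym _ _ hb
      · exact htrans _ _ _ hb (hy v hv)
    · rw [if_neg hb]
      refine List.pairwise_cons.mpr ⟨?_, ih hys⟩
      intro v hv
      rcases (PySem.List.mem_insertBy _ _ _ _).mp hv with rfl | hv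
      · simpa using hb
      · exact hy v hv

theorem pv_sorted2_pairwise_ge (l : List (Int × Int)) :
    (PySem.List.sorted2 l Prod.fst Prod.snd true).Pairwise
      (fun u v => pvB2 Prod.fst Prod.snd v u = false) := by
  induction l using List.reverseRecOn with
  | nil => simp [PySem.List.sorted2]
  | append_singleton l x ih =>
    rw [pv_sorted2_snoc]
    refine pv_insertBy_pairwise _ ?_ ?_ x _ ih
    · intro u v h
      simp only [pvB2, Bool.or_eq_true, Bool.and_eq_true, Bool.not_eq_eq_eq_not, Bool.not_true,
        decide_eq_true_eq, decide_eq_false_iff_not] at h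
      simp only [pvB2, Bool.or_eq_false_iff, Bool.and_eq_false_iff, decide_eq_false_iff_not,
        Bool.not_eq_eq_eq_not, Bool.not_false, decide_eq_true_eq]
      omega
    · intro u v w h1 h2
      simp only [pvB2, Bool.or_eq_true, Bool.and_eq_true, Bool.not_eq_eq_eq_not, Bool.not_true,
        decide_eq_true_eq, decide_eq_false_iff_not] at h1
      simp only [pvB2, Bool.or_eq_false_iff, Bool.and_eq_false_iff, decide_eq_false_iff_not,
        Bool.not_eq_eq_eq_not, Bool.not_false, decide_eq_true_eq] at h2 ⊢
      omega

-- strictly descending keys from a Nodup key list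
theorem pv_sorted2_desc (l : List (Int × Int)) (hnd : l.Nodup) :
    (PySem.List.sorted2 l Prod.fst Prod.snd true).Pairwise
      (fun u v => v.1 < u.1 ∨ (v.1 = u.1 ∧ v.2 < u.2)) := by
  have h1 := pv_sorted2_pairwise_ge l
  have h2 : (PySem.List.sorted2 l Prod.fst Prod.snd true).Nodup :=
    ((PySem.List.sorted2_perm l Prod.fst Prod.snd true).nodup_iff).mpr hnd
  refine (h1.and h2).imp ?_
  rintro u v ⟨hge, hne⟩
  have hne' : ¬ (u.1 = v.1 ∧ u.2 = v.2) := by simpa [Prod.ext_iff] using hne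
  simp only [pvB2, Bool.or_eq_false_iff, Bool.and_eq_false_iff, decide_eq_false_iff_not,
    Bool.not_eq_eq_eq_not, Bool.not_false, decide_eq_true_eq] at hge
  omega

-- the bucket dict groups by key, preserving input order within each bucket
theorem pv_group_getD {α : Type} (keyOf : α → Int × Int) (k : Int × Int) :
    ∀ (l : List α) (d : PySem.Dict (Int × Int) (List α)),
      (l.foldl (fun d e => d.modify (keyOf e) [] (fun b => b ++ [e])) d).getD k []
        = d.getD k [] ++ l.filter (fun e => keyOf e == k) := by
  intro l
  induction l with
  | nil => simp
  | cons e l ih =>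
    intro d
    rw [List.foldl_cons, ih]
    by_cases hk : keyOf e = k
    · rw [hk, PySem.Dict.getD_modify_self]
      simp [hk]
    · rw [PySem.Dict.getD_modify_of_ne _ _ _ (Ne.symm hk)]
      simp [hk]

-- the greedy fill is take-of-flatMap
theorem pv_fill_eq (groups : PySem.Dict (Int × Int) (List (String × String × Int))) (maxE : Int) :
    ∀ (ks : List (Int × Int)) (out : List (String × String × Int)),
      pvFill groups maxE ks out
        = out ++ (ks.flatMap (fun k => groups.getD k [])).take (maxE - out.length).toNat := by
  intro ks
  induction ks with
  | nil => intro out; simp [pvFill]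
  | cons k ks ih =>
    intro out
    rw [pvFill]
    by_cases h : maxE - (out.length : Int) ≤ 0
    · rw [if_pos h]
      have : (maxE - (out.length : Int)).toNat = 0 := by omega
      simp [this]
    · rw [if_neg h]
      rw [PySem.List.slice_to _ (by omega), ih]
      rw [List.flatMap_cons, List.take_append, List.append_assoc]
      congr 2
      have hlen : (out ++ (groups.getD k []).take (maxE - (out.length : Int)).toNat).length
          = out.length + min (maxE - (out.length : Int)).toNat (groups.getD k []).length := by
        simp [List.length_take]
      rw [hlen]
      congr 1
      omega

theorem pv_insertBy_map {α β : Type} (g : α → β) (b : β → β → Bool) (x : α) (l : List α) :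
    PySem.List.insertBy b (g x) (l.map g)
      = (PySem.List.insertBy (fun u v => b (g u) (g v)) x l).map g := by
  induction l with
  | nil => rfl
  | cons y ys ih =>
    rw [List.map_cons, pv_insertBy_cons, pv_insertBy_cons]
    cases b (g x) (g y) <;> simp [ih]

theorem pv_sorted2_rev_map {α β : Type} (g : α → β) (k1 k2 : β → Int) (l : List α) :
    PySem.List.sorted2 (l.map g) k1 k2 true
      = (PySem.List.sorted2 l (fun e => k1 (g e)) (fun e => k2 (g e)) true).map g := by
  induction l using List.reverseRecOn with
  | nil => rfl
  | append_singleton l x ih =>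
    rw [List.map_append, List.map_singleton, pv_sorted2_snoc, pv_sorted2_snoc, ih,
        pv_insertBy_map]
    rfl

theorem pv_insertBy_congr {α : Type} (b b' : α → α → Bool) (x : α) (l : List α)
    (h : ∀ y ∈ l, b x y = b' x y) :
    PySem.List.insertBy b x l = PySem.List.insertBy b' x l := by
  induction l with
  | nil => rfl
  | cons y ys ih =>
    rw [pv_insertBy_cons, pv_insertBy_cons, h y (by simp),
        ih (fun z hz => h z (by simp [hz]))]

theorem pv_sorted2_congr {α : Type} (l : List α) (k1 k2 k1' k2' : α → Int)
    (h : ∀ x ∈ l, k1 x = k1' x ∧ k2 x = k2' x) :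
    PySem.List.sorted2 l k1 k2 true = PySem.List.sorted2 l k1' k2' true := by
  induction l using List.reverseRecOn with
  | nil => rfl
  | append_singleton l x ih =>
    rw [pv_sorted2_snoc, pv_sorted2_snoc, ih (fun y hy => h y (by simp [hy]))]
    apply pv_insertBy_congr
    intro y hy
    have hyl := pv_mem_sorted2 _ _ _ _ hy
    have hxx := h x (by simp)
    have hyy := h y (by simp [hyl])
    simp [pvB2, hxx.1, hxx.2, hyy.1, hyy.2]

theorem pv_items_ofList {κ ν : Type} [BEq κ] [LawfulBEq κ] (l : List (κ × ν))
    (h : (l.map Prod.fst).Nodup) : (PySem.Dict.ofList l).items = l := by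
  have := PySem.Dict.items_foldl_insert_fresh l Prod.fst Prod.snd PySem.Dict.empty
      (by intro a _; simp) h
  simpa [PySem.Dict.ofList, PySem.Dict.update] using this

theorem pv_beq_eq_decide {α : Type} [BEq α] [LawfulBEq α] [DecidableEq α] (a b : α) :
    (a == b) = decide (a = b) := by
  by_cases h : a = b <;> simp [h]

-- the core: on distinct keys, A's dict pipeline (n_nodes > 15 path) equals B's bucket pipeline
theorem pv_main (ec : List (String × String × Int)) (mc : Int × Int)
    (hpre : (List.map (fun f => (f.1, f.2.1)) ec).Nodup) (hmc2 : 0 ≤ mc.2) :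
    (let keys := ec.map (fun e => (e.1, e.2.1))
     let mutualS : PySem.Set (String × String) :=
       PySem.Set.ofList (keys.filter (fun k => keys.contains (k.2, k.1)))
     let kept : PySem.Dict (String × String) Int :=
       ec.foldl (fun d e =>
         if mutualS.contains (e.1, e.2.1) ∨ mc.1 ≤ e.2.2 then d.insert (e.1, e.2.1) e.2.2 else d)
         PySem.Dict.empty
     let kept2 : PySem.Dict (String × String) Int :=
       if mc.2 < (kept.size : Int) then
         PySem.Dict.ofList (PySem.List.slice
           (PySem.List.sorted2 kept.items
             (fun p => if mutualS.contains p.1 then (1 : Int) else 0)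
             (fun p => p.2) true)
           none (some mc.2))
       else kept
     kept2.items.map (fun p => (p.1.1, p.1.2, p.2)))
    =
    (let keys := ec.map (fun f => (f.1, f.2.1))
     let kept := ec.filter (fun e => keys.contains (e.2.1, e.1) || decide (mc.1 ≤ e.2.2))
     if (kept.length : Int) ≤ mc.2 then kept
     else
       let keyOf : String × String × Int → Int × Int :=
         fun e => ((if keys.contains (e.2.1, e.1) then 1 else 0), e.2.2)
       let groups : PySem.Dict (Int × Int) (List (String × String × Int)) :=
         kept.foldl (fun d e => d.modify (keyOf e) [] (fun b => b ++ [e])) PySem.Dict.empty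
       pvFill groups mc.2 (PySem.List.sorted2 groups.keys Prod.fst Prod.snd true) []) := by
  dsimp only []
  have h1 : ∀ e ∈ ec, (PySem.Set.ofList (List.filter (fun k => (List.map (fun e : String × String × Int => (e.1, e.2.1)) ec).contains (k.2, k.1)) (List.map (fun e : String × String × Int => (e.1, e.2.1)) ec))).contains (e.1, e.2.1) = (List.map (fun e : String × String × Int => (e.1, e.2.1)) ec).contains (e.2.1, e.1) := by
    intro e he
    have hkey : ((e.1, e.2.1) : String × String) ∈ (List.map (fun e : String × String × Int => (e.1, e.2.1)) ec) := List.mem_map.mpr ⟨e, he, rfl⟩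
    simp [PySem.Set.contains, List.contains_eq_mem, PySem.Set.mem_ofList, List.mem_filter, hkey]
  have hcongr := PySem.List.foldl_congr_mem ec
      (fun d e => if (PySem.Set.ofList (List.filter (fun k => (List.map (fun e : String × String × Int => (e.1, e.2.1)) ec).contains (k.2, k.1)) (List.map (fun e : String × String × Int => (e.1, e.2.1)) ec))).contains (e.1, e.2.1) ∨ mc.1 ≤ e.2.2 then d.insert (e.1, e.2.1) e.2.2 else d)
      (fun d e => if ((List.map (fun e : String × String × Int => (e.1, e.2.1)) ec).contains (e.2.1, e.1) || decide (mc.1 ≤ e.2.2)) = true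
        then d.insert (e.1, e.2.1) e.2.2 else d)
      PySem.Dict.empty
      (by intro acc e he
          exact if_congr (by simp only [h1 e he, Bool.or_eq_true, decide_eq_true_eq]) rfl rfl)
  rw [hcongr]
  rw [PySem.List.foldl_ite_eq_foldl_filter
      (fun e => ((List.map (fun e : String × String × Int => (e.1, e.2.1)) ec).contains (e.2.1, e.1) || decide (mc.1 ≤ e.2.2)) = true) _ ec _]
  have hfilter : List.filter
      (fun x => decide (((List.map (fun e : String × String × Int => (e.1, e.2.1)) ec).contains (x.2.1, x.1) || decide (mc.1 ≤ x.2.2)) = true)) ec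
      = (List.filter (fun e => (List.map (fun e : String × String × Int => (e.1, e.2.1)) ec).contains (e.2.1, e.1) || decide (mc.1 ≤ e.2.2)) ec) := by simp
  rw [hfilter]
  have hKnod : ((List.filter (fun e => (List.map (fun e : String × String × Int => (e.1, e.2.1)) ec).contains (e.2.1, e.1) || decide (mc.1 ≤ e.2.2)) ec).map (fun e => (e.1, e.2.1))).Nodup :=
    List.Nodup.sublist (List.Sublist.map _ List.filter_sublist) hpre
  have hitems : (List.foldl (fun d e => d.insert (e.1, e.2.1) e.2.2) PySem.Dict.empty (List.filter (fun e => (List.map (fun e : String × String × Int => (e.1, e.2.1)) ec).contains (e.2.1, e.1) || decide (mc.1 ≤ e.2.2)) ec)).items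
      = (List.filter (fun e => (List.map (fun e : String × String × Int => (e.1, e.2.1)) ec).contains (e.2.1, e.1) || decide (mc.1 ≤ e.2.2)) ec).map (fun e : String × String × Int => ((e.1, e.2.1), e.2.2)) := by
    have := PySem.Dict.items_foldl_insert_fresh (List.filter (fun e => (List.map (fun e : String × String × Int => (e.1, e.2.1)) ec).contains (e.2.1, e.1) || decide (mc.1 ≤ e.2.2)) ec) (fun e => (e.1, e.2.1)) (fun e => e.2.2)
      PySem.Dict.empty (by intro a _; simp) hKnod
    simpa using this
  simp only [PySem.Dict.size, hitems, List.length_map]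
  by_cases htr : mc.2 < ((List.filter (fun e => (List.map (fun e : String × String × Int => (e.1, e.2.1)) ec).contains (e.2.1, e.1) || decide (mc.1 ≤ e.2.2)) ec).length : Int)
  · rw [if_pos htr, if_neg (not_le.mpr htr)]
    -- abbreviations
    set klist := List.map (fun e : String × String × Int => (e.1, e.2.1)) ec with hklist
    set KL := List.filter (fun e => klist.contains (e.2.1, e.1) || decide (mc.1 ≤ e.2.2)) ec with hKL
    set mutP := PySem.Set.ofList (List.filter (fun k => klist.contains (k.2, k.1)) klist) with hmutP
    -- ===== A side: reduce to take of the triple-level sorted2 =====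
    rw [pv_sorted2_rev_map (fun e : String × String × Int => ((e.1, e.2.1), e.2.2))
      (fun p => if mutP.contains p.1 then (1 : Int) else 0) (fun p => p.2) KL]
    have hS : PySem.List.sorted2 KL
        (fun e => if mutP.contains ((e.1, e.2.1), e.2.2).1 then (1 : Int) else 0)
        (fun e => ((e.1, e.2.1), e.2.2).2) true
        = PySem.List.sorted2 KL
            (fun e => if klist.contains (e.2.1, e.1) then (1 : Int) else 0)
            (fun e => e.2.2) true := by
      refine pv_sorted2_congr KL _ _ _ _ ?_
      intro e he
      have he' : e ∈ ec := List.mem_of_mem_filter (hKL ▸ he)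
      constructor
      · show (if mutP.contains (e.1, e.2.1) = true then (1 : Int) else 0)
            = if klist.contains (e.2.1, e.1) = true then (1 : Int) else 0
        rw [h1 e he']
      · rfl
    rw [hS, PySem.List.slice_to _ hmc2, ← List.map_take, pv_items_ofList]
    · -- kill the map-unmap round trip
      rw [List.map_map]
      have hid : ((fun p : (String × String) × Int => (p.1.1, p.1.2, p.2)) ∘
          (fun e : String × String × Int => ((e.1, e.2.1), e.2.2))) = id := by
        funext e; rfl
      rw [hid, List.map_id]
      -- ===== B side: keys, buckets, greedy fill =====
      have hkeys : (List.foldl (fun d (e : String × String × Int) =>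
            d.modify ((if klist.contains (e.2.1, e.1) then (1 : Int) else 0), e.2.2) []
              (fun b => b ++ [e])) PySem.Dict.empty KL).keys
          = PySem.Set.ofList (KL.map (fun e => ((if klist.contains (e.2.1, e.1) then (1 : Int) else 0), e.2.2))) :=
        PySem.Dict.keys_foldl_modify_key KL
          (fun e : String × String × Int => ((if klist.contains (e.2.1, e.1) then (1 : Int) else 0), e.2.2))
          [] (fun _ e => fun b => b ++ [e]) PySem.Dict.empty
      rw [hkeys, pv_fill_eq]
      have hgetD : ∀ k, (List.foldl (fun d (e : String × String × Int) =>
            d.modify ((if klist.contains (e.2.1, e.1) then (1 : Int) else 0), e.2.2) []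
              (fun b => b ++ [e])) PySem.Dict.empty KL).getD k []
          = KL.filter (fun e => ((if klist.contains (e.2.1, e.1) then (1 : Int) else 0), e.2.2) == k) := by
        intro k
        simpa [PySem.Dict.getD_empty] using
          pv_group_getD (fun e : String × String × Int => ((if klist.contains (e.2.1, e.1) then (1 : Int) else 0), e.2.2)) k KL PySem.Dict.empty
      have hflatcongr : (PySem.List.sorted2
            (PySem.Set.ofList (KL.map (fun e => ((if klist.contains (e.2.1, e.1) then (1 : Int) else 0), e.2.2))))
            Prod.fst Prod.snd true).flatMap
          (fun k => (List.foldl (fun d (e : String × String × Int) =>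
            d.modify ((if klist.contains (e.2.1, e.1) then (1 : Int) else 0), e.2.2) []
              (fun b => b ++ [e])) PySem.Dict.empty KL).getD k [])
          = (PySem.List.sorted2
            (PySem.Set.ofList (KL.map (fun e => ((if klist.contains (e.2.1, e.1) then (1 : Int) else 0), e.2.2))))
            Prod.fst Prod.snd true).flatMap
          (fun k => KL.filter (fun e => decide ((((if klist.contains (e.2.1, e.1) then (1 : Int) else 0) : Int), e.2.2) = k))) := by
        refine List.flatMap_congr ?_
        intro k _
        rw [hgetD]
        refine List.filter_congr ?_
        intro x _
        exact pv_beq_eq_decide _ _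
      rw [hflatcongr]
      rw [← pv_sorted2_flatMap (fun e : String × String × Int => if klist.contains (e.2.1, e.1) then (1 : Int) else 0)
            (fun e : String × String × Int => e.2.2) _ KL
            (pv_sorted2_desc _ (PySem.Set.nodup_ofList _))
            (by
              intro x hx
              rw [(PySem.List.sorted2_perm _ _ _ _).mem_iff]
              exact (PySem.Set.mem_ofList _ _).mpr (List.mem_map.mpr ⟨x, hx, rfl⟩))]
      simp
    · rw [List.map_map, List.map_take]
      refine List.Nodup.sublist (List.take_sublist _ _) ?_
      refine (List.Perm.nodup_iff (List.Perm.map _ ?_)).mpr hKnod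
      exact PySem.List.sorted2_perm _ _ _ _
  · rw [if_neg htr, if_pos (not_lt.mp htr), hitems]
    simp [List.map_map, Function.comp_def]

theorem filter_edges_py_spec : Claim_equal_filter_edges_py := by
  intro ec n hdom hpre
  unfold Pre_filter_edges_py at hpre
  unfold Spec_filter_edges_py filter_edges_py filter_edges_py_alt
  by_cases h15 : n ≤ 15
  · simp only [if_pos h15]
    rw [pv_items_ofList]
    · simp [List.map_map, Function.comp_def]
    · simpa [List.map_map, Function.comp_def] using hpre
  · simp only [if_neg h15]
    exact pv_main ec (if n ≤ 40 then ((2 : Int), (300 : Int)) else ((3 : Int), (200 : Int)))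
      hpre (by split <;> norm_num)
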